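-- pv_equiv track=rewrite | github.com/ProtikNag/TaylorSeriesExpansionCL | data.py | _select_subset_indices
-- ===== SOURCE A (Python) =====
-- def _select_subset_indices(dataset, class_subset, max_per_class):
--     """Return indices from dataset where each class appears at most max_per_class times."""
--     class_counts = {cls: 0 for cls in class_subset}
--     selected_indices = []
--
--     for idx, (_, label) in enumerate(dataset):
--         if label in class_subset and class_counts[label] < max_per_class:
--             selected_indices.append(idx)
--             class_counts[label] += 1
--         if all(c >= max_per_class for c in class_counts.values()):
--             break
--
--     return selected_indices
-- ===== SOURCE B (Python) =====
-- def _select_subset_indices(dataset, class_subset, max_per_class):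
--     """Return indices from dataset where each class appears at most max_per_class times."""
--     by_class = {}
--     for idx, (_, label) in enumerate(dataset):
--         by_class.setdefault(label, []).append(idx)
--     k = max(max_per_class, 0)
--     picks = []
--     for cls in dict.fromkeys(class_subset):
--         picks.extend(by_class.get(cls, [])[:k])
--     return sorted(picks)
-- ===== Notes on version B (the rewrite author's own statement) =====
-- stated objective: faster
-- what changed: Replaces A's single stateful loop (list-membership test, running per-class counts and an all-counts scan on every element, early break) by a one-pass per-class index table, a per-class truncation to max(max_per_class,0) entries over the deduplicated class list, and a final merge-and-sort pass that restores dataset order.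
import Mathlib
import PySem

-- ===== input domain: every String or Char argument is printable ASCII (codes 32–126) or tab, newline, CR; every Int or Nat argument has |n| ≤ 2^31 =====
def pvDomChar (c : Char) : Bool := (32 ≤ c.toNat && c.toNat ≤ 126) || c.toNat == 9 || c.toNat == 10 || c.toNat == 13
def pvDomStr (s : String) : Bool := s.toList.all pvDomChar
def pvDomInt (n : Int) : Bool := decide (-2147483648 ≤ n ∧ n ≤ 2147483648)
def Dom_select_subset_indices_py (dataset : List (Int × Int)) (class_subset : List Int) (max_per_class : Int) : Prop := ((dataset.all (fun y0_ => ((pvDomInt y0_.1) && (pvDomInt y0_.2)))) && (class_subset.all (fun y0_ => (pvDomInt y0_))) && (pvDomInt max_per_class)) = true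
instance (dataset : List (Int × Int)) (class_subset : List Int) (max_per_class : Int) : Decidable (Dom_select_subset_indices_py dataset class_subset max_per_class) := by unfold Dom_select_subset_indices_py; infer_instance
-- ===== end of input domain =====

-- B replaces A's running-counts loop (with its per-element membership test and all-counts scan)
-- by a one-pass per-class index table, per-class truncation and a final sort (objective: faster,
-- measured).

-- ===== PORT A =====
-- the for-loop over enumerate(dataset), carrying (class_counts, selected_indices); the
-- `break` is the early return when all counts have reached max_per_class
def aLoop (cs : List Int) (mpc : Int) :
    List (Int × Int) → Int → PySem.Dict Int Int → List Int → List Int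
  | [], _, _, sel => sel
  | (_, lab) :: rest, idx, counts, sel =>
    let st :=
      if cs.contains lab && decide (counts.getD lab 0 < mpc) then
        (counts.modify lab 0 (· + 1), sel ++ [idx])
      else (counts, sel)
    if st.1.values.all (fun c => decide (mpc ≤ c)) then st.2
    else aLoop cs mpc rest (idx + 1) st.1 st.2

def select_subset_indices_py (dataset : List (Int × Int)) (class_subset : List Int) (max_per_class : Int) : List Int :=
  -- class_counts = {cls: 0 for cls in class_subset}
  aLoop class_subset max_per_class dataset 0
    (class_subset.foldl (fun d c => d.insert c 0) PySem.Dict.empty) []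

-- ===== PORT B =====
-- by_class.setdefault(label, []).append(idx), one pass over enumerate(dataset)
def bBuild : List (Int × Int) → Int → PySem.Dict Int (List Int) → PySem.Dict Int (List Int)
  | [], _, d => d
  | (_, lab) :: rest, idx, d => bBuild rest (idx + 1) (d.modify lab [] (· ++ [idx]))

def select_subset_indices_py_alt (dataset : List (Int × Int)) (class_subset : List Int) (max_per_class : Int) : List Int :=
  let byClass := bBuild dataset 0 PySem.Dict.empty
  -- k = max(max_per_class, 0); lst[:k] with k ≥ 0 is take k (exact: k is nonnegative here)
  let k := (max max_per_class 0).toNat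
  let picks := (PySem.List.dedup class_subset).foldl
    (fun acc cls => acc ++ (byClass.getD cls []).take k) []
  PySem.List.sorted picks (fun x => x) false

-- ===== PRECONDITION & SPEC =====
def Spec_select_subset_indices_py (dataset : List (Int × Int)) (class_subset : List Int) (max_per_class : Int) (out : List Int) : Prop := out = select_subset_indices_py_alt dataset class_subset max_per_class
instance (dataset : List (Int × Int)) (class_subset : List Int) (max_per_class : Int) (out : List Int) : Decidable (Spec_select_subset_indices_py dataset class_subset max_per_class out) := by unfold Spec_select_subset_indices_py; infer_instance

-- ===== CLAIM (what is proved, stated in full; the proofs are below) =====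
def Claim_equal_select_subset_indices_py : Prop := ∀ (dataset : List (Int × Int)) (class_subset : List Int) (max_per_class : Int), Dom_select_subset_indices_py dataset class_subset max_per_class → Spec_select_subset_indices_py dataset class_subset max_per_class (select_subset_indices_py dataset class_subset max_per_class)

-- ===== LEMMAS AND PROOFS =====

-- reference selection: pick index i when its label is in cs and its class count is below mpc
def bump (cnt : Int → Int) (c : Int) : Int → Int := fun x => if x = c then cnt c + 1 else cnt x

def pick (cs : List Int) (mpc : Int) : List Int → Int → (Int → Int) → List Int
  | [], _, _ => []
  | c :: rest, i, cnt =>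
    if cs.contains c && decide (cnt c < mpc) then i :: pick cs mpc rest (i + 1) (bump cnt c)
    else pick cs mpc rest (i + 1) cnt

-- positions (from offset i) of the labels equal to c
def positions (c : Int) : List Int → Int → List Int
  | [], _ => []
  | a :: rest, i => if a == c then i :: positions c rest (i + 1) else positions c rest (i + 1)

lemma pick_nil_of_full (cs : List Int) (mpc : Int) (l : List Int) (i : Int) (cnt : Int → Int)
    (h : ∀ c, cs.contains c = true → mpc ≤ cnt c) :
    pick cs mpc l i cnt = [] := by
  induction l generalizing i with
  | nil => rfl
  | cons c rest ih =>
    simp only [pick]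
    have hcnd : (cs.contains c && decide (cnt c < mpc)) = false := by
      cases hcb : cs.contains c with
      | false => rfl
      | true =>
        have := h c hcb
        simp only [Bool.true_and, decide_eq_false_iff_not]
        omega
    rw [hcnd]
    simp only [Bool.false_eq_true, if_false]
    exact ih (i + 1)

lemma aLoop_eq_pick (cs : List Int) (mpc : Int) :
    ∀ (l : List (Int × Int)) (idx : Int) (counts : PySem.Dict Int Int) (sel : List Int),
    (∀ c, counts.contains c = cs.contains c) → counts.keys.Nodup →
    aLoop cs mpc l idx counts sel
      = sel ++ pick cs mpc (l.map Prod.snd) idx (fun c => counts.getD c 0) := by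
  intro l
  induction l with
  | nil => intro idx counts sel _ _; simp [aLoop, pick]
  | cons p rest ih =>
    intro idx counts sel hcont hnd
    obtain ⟨x, lab⟩ := p
    by_cases hcond : (cs.contains lab && decide (counts.getD lab 0 < mpc)) = true
    · obtain ⟨hlab, hlt⟩ : cs.contains lab = true ∧ decide (counts.getD lab 0 < mpc) = true := by
        have h2 := hcond; rw [Bool.and_eq_true] at h2; exact h2
      have hclab : counts.contains lab = true := by rw [hcont lab]; exact hlab
      have hcont' : ∀ c, (counts.modify lab 0 (· + 1)).contains c = cs.contains c := by
        intro c
        rw [PySem.Dict.contains_modify]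
        by_cases hc : c = lab
        · subst hc; simp only [BEq.rfl, Bool.true_or]; exact hlab.symm
        · have hbe : (c == lab) = false := by simp [hc]
          rw [hbe, Bool.false_or]; exact hcont c
      have hkeys' : (counts.modify lab 0 (· + 1)).keys = counts.keys := by
        rw [PySem.Dict.keys_modify, PySem.Dict.keys_insert_of_contains _ _ hclab]
      have hnd' : (counts.modify lab 0 (· + 1)).keys.Nodup := by rw [hkeys']; exact hnd
      have hgd : ∀ c, (counts.modify lab 0 (· + 1)).getD c 0
          = bump (fun c => counts.getD c 0) lab c := by
        intro c; rw [PySem.Dict.getD_modify]; simp [bump]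
      by_cases hbrk : ((counts.modify lab 0 (· + 1)).values.all (fun c => decide (mpc ≤ c))) = true
      · have hrest : pick cs mpc (rest.map Prod.snd) (idx + 1)
            (bump (fun c => counts.getD c 0) lab) = [] := by
          apply pick_nil_of_full
          intro c hc
          have hmem : c ∈ (counts.modify lab 0 (· + 1)).keys := by
            rw [← PySem.Dict.contains_iff_mem_keys, hcont' c]; exact hc
          have hv := PySem.Dict.values_eq_map_keys _ hnd' (0 : Int)
          have hall := (List.all_eq_true.mp hbrk) _ (by rw [hv]; exact List.mem_map_of_mem hmem)
          have h2 : mpc ≤ (counts.modify lab 0 (· + 1)).getD c 0 := by simpa using hall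
          rw [hgd c] at h2
          exact h2
        simp only [aLoop, List.map_cons, pick, hcond, if_true, hbrk]
        rw [hrest]
      · simp only [aLoop, List.map_cons, pick, hcond, if_true]
        rw [if_neg hbrk, ih (idx + 1) _ _ hcont' hnd']
        have : (fun c => (counts.modify lab 0 (· + 1)).getD c 0)
            = bump (fun c => counts.getD c 0) lab := funext hgd
        rw [this]
        simp
    · have hcond' : (cs.contains lab && decide (counts.getD lab 0 < mpc)) = false :=
        Bool.eq_false_iff.mpr hcond
      by_cases hbrk : (counts.values.all (fun c => decide (mpc ≤ c))) = true
      · have hrest : pick cs mpc (lab :: rest.map Prod.snd) idx (fun c => counts.getD c 0) = [] := by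
          apply pick_nil_of_full
          intro c hc
          have hmem : c ∈ counts.keys := by
            rw [← PySem.Dict.contains_iff_mem_keys, hcont c]; exact hc
          have hv := PySem.Dict.values_eq_map_keys _ hnd (0 : Int)
          have hall := (List.all_eq_true.mp hbrk) _ (by rw [hv]; exact List.mem_map_of_mem hmem)
          simpa using hall
        simp only [aLoop, hcond', Bool.false_eq_true, if_false, hbrk, if_true, List.map_cons]
        rw [hrest]
        simp
      · simp only [aLoop, List.map_cons, pick, hcond', Bool.false_eq_true, if_false, hbrk]
        exact ih (idx + 1) _ _ hcont hnd

lemma init_getD (cs : List Int) :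
    ∀ (d : PySem.Dict Int Int), (∀ x, d.getD x 0 = 0) →
    ∀ c, (cs.foldl (fun d c => d.insert c 0) d).getD c 0 = 0 := by
  induction cs with
  | nil => intro d h c; exact h c
  | cons a rest ih =>
    intro d h c
    simp only [List.foldl_cons]
    apply ih
    intro y
    rw [PySem.Dict.getD_insert]
    split <;> simp [h]

lemma init_contains (cs : List Int) :
    ∀ (d : PySem.Dict Int Int) (c : Int),
    (cs.foldl (fun d c => d.insert c 0) d).contains c = (cs.contains c || d.contains c) := by
  induction cs with
  | nil => intro d c; simp
  | cons a rest ih =>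
    intro d c
    simp only [List.foldl_cons, ih, PySem.Dict.contains_insert, List.contains_cons]
    by_cases h : c = a
    · simp [h]
    · have hbe : (c == a) = false := by simp [h]
      simp [hbe]

lemma bBuild_getD (c : Int) :
    ∀ (l : List (Int × Int)) (i : Int) (d : PySem.Dict Int (List Int)),
    (bBuild l i d).getD c [] = d.getD c [] ++ positions c (l.map Prod.snd) i := by
  intro l
  induction l with
  | nil => intro i d; simp [bBuild, positions]
  | cons p rest ih =>
    intro i d
    obtain ⟨x, lab⟩ := p
    simp only [bBuild, List.map_cons, positions]
    rw [ih, PySem.Dict.getD_modify]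
    by_cases h : lab = c
    · subst h; simp
    · have hbe : (lab == c) = false := by simp [h]
      have h' : ¬ c = lab := fun he => h he.symm
      simp [hbe, h']

lemma flatMap_update_perm (i : Int) (f g : Int → List Int) :
    ∀ (l : List Int), l.Nodup → ∀ c ∈ l, g c = i :: f c → (∀ a ∈ l, a ≠ c → g a = f a) →
    (l.flatMap g).Perm (i :: l.flatMap f) := by
  intro l
  induction l with
  | nil => intro _ c hc; exact absurd hc List.not_mem_nil
  | cons a rest ih =>
    intro hnd c hc hgc hother
    rcases List.mem_cons.mp hc with h | h
    · subst h
      have hrest : rest.flatMap g = rest.flatMap f := by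
        apply List.flatMap_congr
        intro b hb
        exact hother b (List.mem_cons_of_mem _ hb)
          (fun he => (List.nodup_cons.mp hnd).1 (he ▸ hb))
      simp only [List.flatMap_cons, hgc, hrest, List.cons_append]
      exact List.Perm.refl _
    · have hga : g a = f a :=
        hother a List.mem_cons_self (fun he => (List.nodup_cons.mp hnd).1 (he ▸ h))
      simp only [List.flatMap_cons, hga]
      have h1 : (f a ++ rest.flatMap g).Perm (f a ++ (i :: rest.flatMap f)) :=
        List.Perm.append_left _ (ih (List.nodup_cons.mp hnd).2 c h hgc
          (fun b hb hbc => hother b (List.mem_cons_of_mem _ hb) hbc))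
      exact h1.trans List.perm_middle

lemma pick_perm (cs : List Int) (mpc : Int) :
    ∀ (l : List Int) (i : Int) (cnt : Int → Int), (∀ c, 0 ≤ cnt c) →
    ((PySem.List.dedup cs).flatMap
        (fun c => (positions c l i).take ((mpc - cnt c).toNat))).Perm
      (pick cs mpc l i cnt) := by
  intro l
  induction l with
  | nil =>
    intro i cnt _
    simp [positions, pick, List.flatMap]
  | cons c0 rest ih =>
    intro i cnt hcnt
    by_cases hcond : (cs.contains c0 && decide (cnt c0 < mpc)) = true
    · obtain ⟨hin, hlt'⟩ : cs.contains c0 = true ∧ decide (cnt c0 < mpc) = true := by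
        have h2 := hcond; rw [Bool.and_eq_true] at h2; exact h2
      have hlt : cnt c0 < mpc := of_decide_eq_true hlt'
      have hmem : c0 ∈ PySem.List.dedup cs :=
        (PySem.List.mem_dedup cs c0).mpr (by simpa using hin)
      have hstep : ((PySem.List.dedup cs).flatMap
          (fun c => (positions c (c0 :: rest) i).take ((mpc - cnt c).toNat))).Perm
          (i :: (PySem.List.dedup cs).flatMap
            (fun c => (positions c rest (i + 1)).take ((mpc - bump cnt c0 c).toNat))) := by
        apply flatMap_update_perm i _ _ _ (PySem.List.nodup_dedup cs) c0 hmem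
        · simp only [positions, BEq.rfl, if_true]
          have hb : bump cnt c0 c0 = cnt c0 + 1 := by simp [bump]
          have ht : (mpc - cnt c0).toNat = (mpc - bump cnt c0 c0).toNat + 1 := by
            rw [hb]; omega
          rw [ht, List.take_succ_cons]
        · intro a _ hane
          have hane' : ¬ c0 = a := fun he => hane he.symm
          have hbe : (c0 == a) = false := by simp [hane']
          have hba : bump cnt c0 a = cnt a := by simp [bump, hane]
          simp only [positions, hbe, Bool.false_eq_true, if_false, hba]
      refine hstep.trans ?_
      simp only [pick, hcond, if_true]
      refine List.Perm.cons i (ih (i + 1) (bump cnt c0) ?_)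
      intro c
      by_cases hc : c = c0
      · have := hcnt c0; simp [bump, hc]; omega
      · simp [bump, hc]; exact hcnt c
    · have hcond' : (cs.contains c0 && decide (cnt c0 < mpc)) = false := Bool.eq_false_iff.mpr hcond
      have heq : (PySem.List.dedup cs).flatMap
          (fun c => (positions c (c0 :: rest) i).take ((mpc - cnt c).toNat))
          = (PySem.List.dedup cs).flatMap
            (fun c => (positions c rest (i + 1)).take ((mpc - cnt c).toNat)) := by
        apply List.flatMap_congr
        intro a ha
        by_cases hae : a = c0
        · subst hae
          have hin : cs.contains a = true := by
            have := (PySem.List.mem_dedup cs a).mp ha; simpa using this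
          have hge : mpc ≤ cnt a := by
            rcases Bool.and_eq_false_iff.mp hcond' with h | h
            · rw [hin] at h
              exact absurd h (by decide)
            · have := of_decide_eq_false h; omega
          have ht : (mpc - cnt a).toNat = 0 := by omega
          rw [ht]
          simp
        · have hbe : (c0 == a) = false := by simp [Ne.symm hae]
          simp only [positions, hbe, Bool.false_eq_true, if_false]
      rw [heq]
      simp only [pick, hcond', Bool.false_eq_true, if_false]
      exact ih (i + 1) cnt hcnt

lemma pick_lb (cs : List Int) (mpc : Int) :
    ∀ (l : List Int) (i : Int) (cnt : Int → Int), ∀ j ∈ pick cs mpc l i cnt, i ≤ j := by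
  intro l
  induction l with
  | nil => intro i cnt j hj; simp [pick] at hj
  | cons c rest ih =>
    intro i cnt j hj
    simp only [pick] at hj
    split at hj
    · rcases List.mem_cons.mp hj with h | h
      · omega
      · have := ih (i + 1) _ j h; omega
    · have := ih (i + 1) _ j hj; omega

lemma pick_pairwise (cs : List Int) (mpc : Int) :
    ∀ (l : List Int) (i : Int) (cnt : Int → Int), (pick cs mpc l i cnt).Pairwise (· ≤ ·) := by
  intro l
  induction l with
  | nil => intro i cnt; simp [pick]
  | cons c rest ih =>
    intro i cnt
    simp only [pick]
    split
    · exact List.Pairwise.cons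
        (fun j hj => by have := pick_lb cs mpc rest (i + 1) _ j hj; omega) (ih _ _)
    · exact ih _ _

-- ===== VERDICT (by name: the statement is the Claim_ definition above) =====
theorem select_subset_indices_py_spec : Claim_equal_select_subset_indices_py := by
  intro ds cs mpc _
  unfold Spec_select_subset_indices_py
  -- A's loop computes the reference selection with all counts starting at 0
  have hA : select_subset_indices_py ds cs mpc
      = pick cs mpc (ds.map Prod.snd) 0 (fun _ => 0) := by
    unfold select_subset_indices_py
    rw [aLoop_eq_pick cs mpc ds 0 _ []
      (by intro c; rw [init_contains cs _ c]; simp)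
      (PySem.Dict.nodup_keys_foldl_insert cs (fun _ _ => 0) PySem.Dict.empty
        PySem.Dict.nodup_keys_empty)]
    have : (fun c => (cs.foldl (fun d c => d.insert c 0) PySem.Dict.empty).getD c 0)
        = (fun _ => (0 : Int)) := by
      funext c
      exact init_getD cs PySem.Dict.empty (fun x => PySem.Dict.getD_empty x 0) c
    rw [this]
    simp
  -- B builds the per-class position lists, truncates, merges and sorts
  have hB : select_subset_indices_py_alt ds cs mpc
      = PySem.List.sorted ((PySem.List.dedup cs).flatMap
          (fun c => (positions c (ds.map Prod.snd) 0).take ((mpc - (0 : Int)).toNat)))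
          (fun x => x) false := by
    unfold select_subset_indices_py_alt
    simp only [PySem.List.foldl_append_eq_flatMap, List.nil_append]
    congr 1
    apply List.flatMap_congr
    intro c _
    rw [bBuild_getD c ds 0 PySem.Dict.empty, PySem.Dict.getD_empty, List.nil_append]
    congr 1
    omega
  rw [hA, hB]
  refine (PySem.List.sorted_id_eq_of_perm_of_pairwise _ _ ?_ ?_).symm
  · exact (pick_perm cs mpc (ds.map Prod.snd) 0 (fun _ => 0) (fun _ => le_refl 0)).symm
  · exact pick_pairwise cs mpc (ds.map Prod.snd) 0 (fun _ => 0)
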